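-- pv_equiv track=rewrite | github.com/yuezheng2006/AceForge | mufun_model_setup.py | _normalize_mufun_prompt
-- ===== SOURCE A (Python) =====
-- def _normalize_mufun_prompt(text: str) -> str:
--     """
--     Clean up MuFun 'prompt' tag strings:
--
--       * Fix known typos (exurberant → exuberant)
--       * Drop junk tags (other, absolute music, internal use)
--       * Deduplicate tags
--       * Re-capitalize nicely
--     """
--     if not text:
--         return ""
--
--     raw_parts = [p.strip() for p in str(text).split(",")]
--     cleaned: list[str] = []
--     seen: set[str] = set()
--
--     blacklist = {"other", "absolute music", "internal use"}
--     replacements = {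
--         "exurberant": "exuberant",
--         # Seen in sample output; normalize this into a nicer form.
--         "instrumentalpop": "instrumental pop",
--     }
--
--     for part in raw_parts:
--         if not part:
--             continue
--
--         lower = part.lower()
--         # Apply typo fixes first
--         if lower in replacements:
--             part = replacements[lower]
--             lower = part.lower()
--
--         if lower in blacklist:
--             continue
--
--         if lower in seen:
--             continue
--
--         seen.add(lower)
--
--         # Simple "nice" capitalization without overthinking it
--         if part and not part[0].isupper():
--             part = part[0].upper() + part[1:]
--
--         cleaned.append(part)
--
--     return ", ".join(cleaned)
-- ===== SOURCE B (Python) =====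
-- def _normalize_mufun_prompt(text: str) -> str:
--     """Recursive delete-ahead dedup: no seen-set; each kept head erases its later
--     case-insensitive duplicates from the rest before recursing."""
--     if not text:
--         return ""
--
--     REPL = {"exurberant": "exuberant", "instrumentalpop": "instrumental pop"}
--     BLACK = {"other", "absolute music", "internal use"}
--
--     def norm(q):
--         p = q.strip()
--         if not p:
--             return None
--         p = REPL.get(p.lower(), p)
--         return None if p.lower() in BLACK else p
--
--     def dedupe(parts):
--         # keep the head, delete all its later lowercase-equal duplicates, recurse
--         if not parts:
--             return []
--         head = parts[0]
--         return [head] + dedupe([p for p in parts[1:] if p.lower() != head.lower()])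
--
--     parts = [p for p in map(norm, str(text).split(",")) if p is not None]
--     return ", ".join(p[0].upper() + p[1:] for p in dedupe(parts))
-- ===== Notes on version B (the rewrite author's own statement) =====
-- stated objective: alternative
-- what changed: A's single fused loop with a mutable seen-set accumulator is replaced by a normalize pass followed by a recursive delete-ahead deduplication: each kept head removes all its later case-insensitive duplicates from the remaining list before recursing, so no seen-set or dict is maintained at all.
import Mathlib
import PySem

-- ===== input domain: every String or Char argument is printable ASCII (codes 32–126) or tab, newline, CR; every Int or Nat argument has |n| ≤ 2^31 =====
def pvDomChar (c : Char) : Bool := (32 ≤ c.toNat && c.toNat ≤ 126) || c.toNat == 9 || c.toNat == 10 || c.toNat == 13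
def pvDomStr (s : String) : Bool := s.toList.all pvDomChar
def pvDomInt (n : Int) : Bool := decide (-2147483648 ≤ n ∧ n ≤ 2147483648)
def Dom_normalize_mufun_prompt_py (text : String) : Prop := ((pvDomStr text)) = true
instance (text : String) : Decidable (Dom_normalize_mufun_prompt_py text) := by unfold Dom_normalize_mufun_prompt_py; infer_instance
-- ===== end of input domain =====

-- B replaces A's fused loop with a mutable seen-set by a normalize pass plus a recursive
-- delete-ahead deduplication (each kept head erases its later case-insensitive duplicates);
-- alternative decomposition, no seen-set maintained.

-- shared literal data of the two ports (the same literals appear in both Pythons)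
def pvReplacements : PySem.Dict String String :=
  PySem.Dict.mk [("exurberant", "exuberant"), ("instrumentalpop", "instrumental pop")]
def pvBlacklist : PySem.Set String := ["other", "absolute music", "internal use"]

-- ===== PORT A =====
-- the loop of A, carrying the state (cleaned, seen) exactly as the Python does
def pvA_loop : List String → List String → PySem.Set String → List String
  | [], cleaned, _ => cleaned
  | p :: rest, cleaned, seen =>
    if p = "" then pvA_loop rest cleaned seen
    else
      let lower0 := PySem.Str.lower p
      let pl : String × String :=
        match PySem.Dict.get? pvReplacements lower0 with
        | some r => (r, PySem.Str.lower r)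
        | none => (p, lower0)
      if PySem.Set.contains pvBlacklist pl.2 then pvA_loop rest cleaned seen
      else if PySem.Set.contains seen pl.2 then pvA_loop rest cleaned seen
      else
        let part :=
          match pl.1.toList with
          | [] => pl.1
          | c :: cs => if ¬ PySem.Chars.isupper c then String.ofList (PySem.Chars.upperChar c :: cs) else pl.1
        pvA_loop rest (cleaned ++ [part]) (PySem.Set.add seen pl.2)

def normalize_mufun_prompt_py (text : String) : String :=
  if text = "" then ""
  else
    let raw_parts := ((PySem.Str.split? text ",").getD []).map PySem.Str.strip
    PySem.Str.join ", " (pvA_loop raw_parts [] PySem.Set.empty)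

-- ===== PORT B =====
-- Source B's norm(q): strip, drop empties, apply typo fix, drop blacklisted (body on stripped input)
def pvB_norm0 (p : String) : Option String :=
  if p = "" then none
  else
    let p' := PySem.Dict.getD pvReplacements (PySem.Str.lower p) p
    if PySem.Set.contains pvBlacklist (PySem.Str.lower p') then none else some p'

def pvB_norm (q : String) : Option String := pvB_norm0 (PySem.Str.strip q)

-- Source B's dedupe: keep the head, delete all later lowercase-equal duplicates, recurse
def pvDedup : List String → List String
  | [] => []
  | q :: qs => q :: pvDedup (qs.filter (fun p => !(PySem.Str.lower p == PySem.Str.lower q)))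
termination_by xs => xs.length
decreasing_by
  simp only [List.length_cons, List.length_unattach]
  exact Nat.lt_succ_of_le (le_trans (List.length_filter_le _ _) (by simp))

def pvB_capFirst (p : String) : String :=
  match p.toList with
  | [] => p
  | c :: cs => String.ofList (PySem.Chars.upperChar c :: cs)

def normalize_mufun_prompt_py_alt (text : String) : String :=
  if text = "" then ""
  else
    let parts := ((PySem.Str.split? text ",").getD []).filterMap pvB_norm
    PySem.Str.join ", " ((pvDedup parts).map pvB_capFirst)

-- ===== PRECONDITION & SPEC =====
def Spec_normalize_mufun_prompt_py (text : String) (out : String) : Prop := out = normalize_mufun_prompt_py_alt text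
instance (text : String) (out : String) : Decidable (Spec_normalize_mufun_prompt_py text out) := by unfold Spec_normalize_mufun_prompt_py; infer_instance

-- ===== CLAIM (what is proved, stated in full; the proofs are below) =====
def Claim_equal_normalize_mufun_prompt_py : Prop := ∀ (text : String), Dom_normalize_mufun_prompt_py text → Spec_normalize_mufun_prompt_py text (normalize_mufun_prompt_py text)

-- ===== LEMMAS AND PROOFS =====

-- reference: what A's dedup appends, given the list of already-used lowercase keys
def pvNewB : List String → PySem.Set String → List String
  | [], _ => []
  | q :: qs, ks =>
    if PySem.Set.contains ks (PySem.Str.lower q) then pvNewB qs ks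
    else q :: pvNewB qs (PySem.Set.add ks (PySem.Str.lower q))

-- A's in-loop capitalization equals B's unconditional first-character uppercasing
lemma pv_cap_eq (q : String) :
    (match q.toList with
      | [] => q
      | c :: cs => if ¬ PySem.Chars.isupper c then String.ofList (PySem.Chars.upperChar c :: cs) else q)
    = pvB_capFirst q := by
  unfold pvB_capFirst
  cases hq : q.toList with
  | nil => rfl
  | cons c cs =>
    by_cases h : PySem.Chars.isupper c = true
    · have hlow : PySem.Chars.islower c = false := by
        simp only [PySem.Chars.isupper, Bool.and_eq_true, decide_eq_true_eq] at h
        simp only [PySem.Chars.islower, Bool.and_eq_false_iff, decide_eq_false_iff_not, not_le]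
        exact Or.inl (lt_of_le_of_lt h.2 (by decide))
      have hup : PySem.Chars.upperChar c = c := by
        simp [PySem.Chars.upperChar, hlow]
      simp only [h, not_true_eq_false, if_false, hup]
      conv_lhs => rw [← String.ofList_toList (s := q), hq]
    · simp [h]

-- A's fused loop computes exactly: previous output ++ capitalized seen-set dedup of the normalized list
lemma pv_loop_eq (parts : List String) : ∀ (cleaned : List String) (seen : PySem.Set String),
    pvA_loop parts cleaned seen
      = cleaned ++ (pvNewB (parts.filterMap pvB_norm0) seen).map pvB_capFirst := by
  induction parts with
  | nil => intro cleaned seen; simp [pvA_loop, pvNewB]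
  | cons p rest ih =>
    intro cleaned seen
    by_cases hp : p = ""
    · subst hp
      have h0 : pvB_norm0 "" = none := by simp [pvB_norm0]
      simp only [pvA_loop, if_true, List.filterMap_cons, h0, ih]
    · have hq : (PySem.Dict.getD pvReplacements (PySem.Str.lower p) p,
          PySem.Str.lower (PySem.Dict.getD pvReplacements (PySem.Str.lower p) p))
          = (match PySem.Dict.get? pvReplacements (PySem.Str.lower p) with
             | some r => (r, PySem.Str.lower r)
             | none => (p, PySem.Str.lower p)) := by
        rw [PySem.Dict.getD_eq_get?_getD]
        cases PySem.Dict.get? pvReplacements (PySem.Str.lower p) <;> simp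
      set q := PySem.Dict.getD pvReplacements (PySem.Str.lower p) p with hqdef
      have hfm : List.filterMap pvB_norm0 (p :: rest)
          = (if PySem.Set.contains pvBlacklist (PySem.Str.lower q)
             then List.filterMap pvB_norm0 rest
             else q :: List.filterMap pvB_norm0 rest) := by
        simp only [List.filterMap_cons, pvB_norm0, hp, if_false, ← hqdef]
        by_cases hb : PySem.Set.contains pvBlacklist (PySem.Str.lower q) = true
        · rw [if_pos hb, if_pos hb]
        · rw [if_neg hb, if_neg hb]
      simp only [pvA_loop, hp, if_false, ← hq, hfm]
      by_cases hb : PySem.Set.contains pvBlacklist (PySem.Str.lower q) = true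
      · simp only [hb, if_true, ih]
      · have hb' := eq_false_of_ne_true hb
        simp only [hb', Bool.false_eq_true, if_false, pvNewB]
        by_cases hs : PySem.Set.contains seen (PySem.Str.lower q) = true
        · simp only [hs, if_true, ih]
        · have hs' := eq_false_of_ne_true hs
          simp only [hs', Bool.false_eq_true, if_false, ih, pv_cap_eq,
            List.map_cons, List.append_assoc, List.cons_append, List.nil_append]

-- the seen-set dedup equals B's recursive delete-ahead dedup of the not-yet-seen elements
lemma pv_dedup_eq (xs : List String) : ∀ (ks : PySem.Set String),
    pvNewB xs ks = pvDedup (xs.filter (fun x => !(PySem.Set.contains ks (PySem.Str.lower x)))) := by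
  induction xs with
  | nil => intro ks; simp [pvNewB, pvDedup]
  | cons x xs ih =>
    intro ks
    by_cases h : PySem.Set.contains ks (PySem.Str.lower x) = true
    · simp only [pvNewB, h, if_true, List.filter_cons, Bool.not_true, Bool.false_eq_true,
        if_false, ih]
    · have h' := eq_false_of_ne_true h
      have hadd : PySem.Set.add ks (PySem.Str.lower x) = ks ++ [PySem.Str.lower x] := by
        simp only [PySem.Set.add, h', Bool.false_eq_true, if_false]
      simp only [pvNewB, h', Bool.false_eq_true, if_false, List.filter_cons, Bool.not_false,
        if_true, pvDedup, List.cons.injEq, true_and, ih, hadd, List.filter_filter]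
      congr 1
      apply List.filter_congr
      intro y _
      by_cases h1 : PySem.Str.lower y = PySem.Str.lower x <;>
        by_cases h2 : PySem.Str.lower y ∈ ks <;>
          simp [List.mem_append, h1, h2]
-- ===== VERDICT (by name: the statement is the Claim_ definition above) =====
theorem normalize_mufun_prompt_py_spec : Claim_equal_normalize_mufun_prompt_py := by
  intro text _
  unfold Spec_normalize_mufun_prompt_py normalize_mufun_prompt_py normalize_mufun_prompt_py_alt
  by_cases h : text = ""
  · simp [h]
  · simp only [h, if_false]
    rw [pv_loop_eq, pv_dedup_eq]
    have : ∀ (l : List String),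
        l.filter (fun x => !(PySem.Set.contains PySem.Set.empty (PySem.Str.lower x))) = l := by
      intro l; simp [PySem.Set.empty]
    rw [this, List.filterMap_map]
    rfl
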